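-- pv_equiv track=rewrite | github.com/Tranxmart/template | scripts/ci/list-presets.py | select_presets
-- ===== SOURCE A (Python) =====
-- def select_presets(presets, names):
--     if not names:
--         return presets
--     by_name = {preset["name"]: preset for preset in presets}
--     selected = []
--     for name in names:
--         if name not in by_name:
--             raise ValueError(f"Unknown preset '{name}'")
--         selected.append(by_name[name])
--     return selected
-- ===== SOURCE B (Python) =====
-- def select_presets(presets, names):
--     if not names:
--         return presets
--     head, *rest = names
--     match = next((p for p in presets if p["name"] == head), None)
--     if match is None:
--         raise ValueError(f"Unknown preset '{head}'")
--     return [match] + (select_presets(presets, rest) if rest else [])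
-- ===== Notes on version B (the rewrite author's own statement) =====
-- stated objective: simpler
-- what changed: Replaced the dict-build-then-loop with a recursion over names that resolves each name by a forward first-match scan via next(); Pre_ excludes inputs on which a requested name is carried by two distinct presets (A's dict-reinsertion last-wins pick vs B's first match is nobody's specification) and the inputs on which A raises KeyError/ValueError.
import Mathlib
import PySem

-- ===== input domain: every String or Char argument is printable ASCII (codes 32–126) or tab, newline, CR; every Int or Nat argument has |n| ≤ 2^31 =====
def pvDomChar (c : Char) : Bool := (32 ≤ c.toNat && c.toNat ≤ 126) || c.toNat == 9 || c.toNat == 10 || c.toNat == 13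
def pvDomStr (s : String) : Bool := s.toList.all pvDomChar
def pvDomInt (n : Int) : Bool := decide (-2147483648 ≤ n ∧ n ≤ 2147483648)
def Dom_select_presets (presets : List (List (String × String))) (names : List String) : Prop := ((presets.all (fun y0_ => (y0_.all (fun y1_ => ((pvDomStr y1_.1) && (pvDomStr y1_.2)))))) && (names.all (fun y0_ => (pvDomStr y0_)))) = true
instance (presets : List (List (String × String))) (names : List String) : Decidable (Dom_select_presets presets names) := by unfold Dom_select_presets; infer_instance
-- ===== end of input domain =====

-- B replaces A's dict-build-then-loop by a recursion over names with a forward first-match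
-- scan per name; objective: simpler. Raise cases and duplicate preset names are outside Pre_.

-- ===== PORT A =====
-- preset["name"] / preset.get("name"): first-match lookup on the association list
def pvNameOf (p : List (String × String)) : Option String :=
  (p.find? (fun kv => kv.1 == "name")).map (·.2)

-- the dict comprehension {preset["name"]: preset for preset in presets}; none = KeyError
def pvBuildByName : List (List (String × String)) →
    PySem.Dict String (List (String × String)) →
    Option (PySem.Dict String (List (String × String)))
  | [], d => some d
  | p :: rest, d =>
    match pvNameOf p with
    | none => none
    | some k => pvBuildByName rest (d.insert k p)

-- the 'for name in names' loop with 'selected.append'; none = ValueError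
def pvSelLoop (byName : PySem.Dict String (List (String × String))) :
    List String → List (List (String × String)) → Option (List (List (String × String)))
  | [], acc => some acc
  | n :: rest, acc =>
    match byName.get? n with
    | none => none
    | some p => pvSelLoop byName rest (acc ++ [p])

def select_presets (presets : List (List (String × String))) (names : List String) :
    List (List (String × String)) :=
  if names = [] then presets
  else
    match pvBuildByName presets PySem.Dict.empty with
    | none => []  -- KeyError: excluded by Pre_
    | some byName => (pvSelLoop byName names []).getD []  -- ValueError: excluded by Pre_

-- ===== PORT B =====
-- the generator scan (p for p in presets if p["name"] == head):
-- outer none = KeyError on a preset lacking "name"; some none = exhausted (ValueError)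
def pvScan : List (List (String × String)) → String → Option (Option (List (String × String)))
  | [], _ => some none
  | p :: rest, head =>
    match pvNameOf p with
    | none => none
    | some k => if k = head then some (some p) else pvScan rest head

-- recursion over names: next((p for p in presets if p["name"] == head), None)
def select_presets_alt (presets : List (List (String × String))) :
    List String → List (List (String × String))
  | [] => presets
  | head :: rest =>
    match pvScan presets head with
    | none => []        -- KeyError: excluded by Pre_
    | some none => []   -- ValueError: excluded by Pre_
    | some (some m) => m :: (if rest = [] then [] else select_presets_alt presets rest)

-- ===== PRECONDITION & SPEC =====
-- Pre_ excludes the inputs where A raises (with names nonempty: a preset lacking a "name"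
-- key = KeyError, a requested name matching no preset = ValueError) and, because first-vs-last
-- match on duplicate keys is nobody's specification, inputs where a requested name is carried
-- by two DISTINCT presets, on which A's dict-reinsertion last-wins value is accidental.
def Pre_select_presets (presets : List (List (String × String))) (names : List String) : Prop :=
  names = [] ∨
    ((∀ p ∈ presets, (pvNameOf p).isSome) ∧
     (∀ n ∈ names, ∃ p ∈ presets, pvNameOf p = some n) ∧
     ∀ n ∈ names, ∀ p ∈ presets, ∀ q ∈ presets,
       pvNameOf p = some n → pvNameOf q = some n → p = q)
instance (presets : List (List (String × String))) (names : List String) : Decidable (Pre_select_presets presets names) := by unfold Pre_select_presets; infer_instance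

def pvWitness_select_presets : (List (List (String × String))) × List String :=
  ([[("name", "a"), ("v", "1")], [("name", "b")]], ["b", "a"])

def Spec_select_presets (presets : List (List (String × String))) (names : List String) (out : List (List (String × String))) : Prop := out = select_presets_alt presets names
instance (presets : List (List (String × String))) (names : List String) (out : List (List (String × String))) : Decidable (Spec_select_presets presets names out) := by unfold Spec_select_presets; infer_instance

-- ===== CLAIM (what is proved, stated in full; the proofs are below) =====
def Claim_equal_select_presets : Prop := ∀ (presets : List (List (String × String))) (names : List String), Dom_select_presets presets names → Pre_select_presets presets names → Spec_select_presets presets names (select_presets presets names)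

-- ===== LEMMAS AND PROOFS =====

-- proof-side helper: the value A's dict associates with n is the LAST matching preset
def pvFindRev (presets : List (List (String × String))) (n : String) :
    Option (List (String × String)) :=
  presets.reverse.find? (fun p => pvNameOf p == some n)

-- the dict built by A answers lookups like a reverse scan (falling back to the seed dict)
theorem pvBuild_get (presets : List (List (String × String)))
    (d d' : PySem.Dict String (List (String × String)))
    (h : pvBuildByName presets d = some d') (n : String) :
    d'.get? n = (pvFindRev presets n).orElse (fun _ => d.get? n) := by
  induction presets generalizing d with
  | nil =>
    simp [pvBuildByName] at h
    subst h
    simp [pvFindRev]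
  | cons p rest ih =>
    simp only [pvBuildByName] at h
    cases hk : pvNameOf p with
    | none => simp [hk] at h
    | some k =>
      rw [hk] at h
      have := ih (d.insert k p) h
      rw [this]
      simp only [pvFindRev, List.reverse_cons, List.find?_append]
      cases hfind : (rest.reverse.find? (fun q => pvNameOf q == some n)) with
      | some q => simp [Option.orElse]
      | none =>
        simp only [Option.orElse, List.find?]
        by_cases hkn : k = n
        · subst hkn
          simp [hk, PySem.Dict.get?_insert_self]
        · have : (pvNameOf p == some n) = false := by
            simp [hk]; exact hkn
          simp [this, PySem.Dict.get?_insert_of_ne _ _ (fun h => hkn h.symm)]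

-- when every preset has a "name", the build never raises
theorem pvBuild_total (presets : List (List (String × String)))
    (h : ∀ p ∈ presets, (pvNameOf p).isSome) (d : PySem.Dict String (List (String × String))) :
    ∃ d', pvBuildByName presets d = some d' := by
  induction presets generalizing d with
  | nil => exact ⟨d, rfl⟩
  | cons p rest ih =>
    have hp := h p (by simp)
    cases hk : pvNameOf p with
    | none => rw [hk] at hp; simp at hp
    | some k =>
      obtain ⟨d', hd'⟩ := ih (fun q hq => h q (by simp [hq])) (d.insert k p)
      exact ⟨d', by simp [pvBuildByName, hk, hd']⟩

-- when all matching elements are equal, the reverse (last-match) scan equals the forward scan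
theorem pvFindRev_eq_find {α : Type} (l : List α) (pred : α → Bool)
    (h : ∀ p ∈ l, ∀ q ∈ l, pred p → pred q → p = q) :
    l.reverse.find? pred = l.find? pred := by
  induction l with
  | nil => rfl
  | cons a t ih =>
    simp only [List.reverse_cons, List.find?_append, List.find?]
    by_cases ha : pred a = true
    · rw [ha]
      cases hf : t.reverse.find? pred with
      | none => simp
      | some q =>
        have hq : q ∈ t := List.mem_reverse.mp (List.mem_of_find?_eq_some hf)
        have hpq : pred q := List.find?_some hf
        have : q = a := h q (by simp [hq]) a (by simp) hpq ha
        simp [this]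
    · have ha' : pred a = false := by simpa using ha
      rw [ha']
      rw [ih (fun p hp q hq => h p (by simp [hp]) q (by simp [hq]))]
      cases hf : t.find? pred <;> simp

-- A's selection loop computes mapM over the dict lookups (shifted by the accumulator)
theorem pvSel_eq_mapM (byName : PySem.Dict String (List (String × String)))
    (f : String → Option (List (String × String))) (names : List String)
    (hagree : ∀ n ∈ names, byName.get? n = f n)
    (acc : List (List (String × String))) :
    pvSelLoop byName names acc = (names.mapM f).map (acc ++ ·) := by
  induction names generalizing acc with
  | nil => simp [pvSelLoop]
  | cons n rest ih =>
    have hn := hagree n (by simp)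
    simp only [pvSelLoop, hn, List.mapM_cons]
    cases hf : f n with
    | none => simp
    | some p =>
      simp only []
      rw [ih (fun m hm => hagree m (by simp [hm]))]
      cases hrest : rest.mapM f with
      | none => simp
      | some l => simp [List.append_assoc]

-- the forward scan succeeds whenever some preset carries the name
theorem pvFind_isSome (presets : List (List (String × String))) (n : String)
    (h : ∃ p ∈ presets, pvNameOf p = some n) :
    (presets.find? (fun p => pvNameOf p == some n)).isSome := by
  obtain ⟨p, hp, hname⟩ := h
  cases hfind : presets.find? (fun p => pvNameOf p == some n) with
  | some q => simp
  | none =>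
    have := List.find?_eq_none.mp hfind p hp
    simp [hname] at this

-- mapM of a function that succeeds on every element succeeds
theorem pvMapM_total {α β : Type} (f : α → Option β) (l : List α)
    (h : ∀ x ∈ l, (f x).isSome) : ∃ r, l.mapM f = some r := by
  induction l with
  | nil => exact ⟨[], rfl⟩
  | cons x t ih =>
    obtain ⟨y, hy⟩ := Option.isSome_iff_exists.mp (h x (by simp))
    obtain ⟨r, hr⟩ := ih (fun z hz => h z (by simp [hz]))
    exact ⟨y :: r, by simp [List.mapM_cons, hy, hr]⟩

-- when every preset has a "name", B's scan is the forward find?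
theorem pvScan_eq_find (presets : List (List (String × String)))
    (hall : ∀ p ∈ presets, (pvNameOf p).isSome) (n : String) :
    pvScan presets n = some (presets.find? (fun p => pvNameOf p == some n)) := by
  induction presets with
  | nil => rfl
  | cons p rest ih =>
    have hp := hall p (by simp)
    cases hk : pvNameOf p with
    | none => rw [hk] at hp; simp at hp
    | some k =>
      simp only [pvScan, hk, List.find?]
      by_cases hkn : k = n
      · subst hkn; simp
      · have hkb : (some k == some n) = false := by simpa using hkn
        rw [if_neg hkn]
        simp only [hkb]
        exact ih (fun q hq => hall q (by simp [hq]))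

-- B's recursion equals mapM of the forward scan when every name is found
theorem pvAlt_eq_mapM (presets : List (List (String × String))) (names : List String)
    (hne : names ≠ []) (hps : ∀ p ∈ presets, (pvNameOf p).isSome)
    (hall : ∀ n ∈ names, (presets.find? (fun p => pvNameOf p == some n)).isSome) :
    select_presets_alt presets names =
      (names.mapM (fun n => presets.find? (fun p => pvNameOf p == some n))).getD [] := by
  induction names with
  | nil => exact absurd rfl hne
  | cons n rest ih =>
    have hn := hall n (by simp)
    obtain ⟨m, hm⟩ := Option.isSome_iff_exists.mp hn
    simp only [select_presets_alt, pvScan_eq_find presets hps n, hm, List.mapM_cons]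
    by_cases hr : rest = []
    · subst hr
      simp
    · rw [if_neg hr, ih hr (fun q hq => hall q (by simp [hq]))]
      have : ∀ q ∈ rest, (presets.find? (fun p => pvNameOf p == some q)).isSome :=
        fun q hq => hall q (by simp [hq])
      obtain ⟨r, hr⟩ := pvMapM_total _ rest this
      simp [hr]

-- ===== VERDICT (by name: the statement is the Claim_ definition above) =====
theorem select_presets_spec : Claim_equal_select_presets := by
  intro presets names _ hpre
  unfold Spec_select_presets
  rcases hpre with hnil | ⟨hall, hmem, huniq⟩
  · subst hnil; rfl
  by_cases hnames : names = []
  · subst hnames; rfl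
  unfold select_presets
  rw [if_neg hnames]
  obtain ⟨byName, hbuild⟩ := pvBuild_total presets hall PySem.Dict.empty
  rw [hbuild]
  show (pvSelLoop byName names []).getD [] = _
  have hfind : ∀ n ∈ names, (presets.find? (fun p => pvNameOf p == some n)).isSome :=
    fun n hn => pvFind_isSome presets n (hmem n hn)
  have hagree : ∀ n ∈ names,
      byName.get? n = presets.find? (fun p => pvNameOf p == some n) := by
    intro n hn
    rw [pvBuild_get presets _ _ hbuild n]
    rw [show pvFindRev presets n = presets.find? (fun p => pvNameOf p == some n) from
      pvFindRev_eq_find presets _ (fun p hp q hq hpn hqn =>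
        huniq n hn p hp q hq (by simpa using hpn) (by simpa using hqn))]
    have := hfind n hn
    cases hf : presets.find? (fun p => pvNameOf p == some n) with
    | none => rw [hf] at this; simp at this
    | some q => simp [Option.orElse]
  rw [pvSel_eq_mapM byName _ names hagree [], pvAlt_eq_mapM presets names hnames hall hfind]
  cases hm : names.mapM (fun n => presets.find? (fun p => pvNameOf p == some n)) <;> simp
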